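-- pv_equiv track=rewrite | github.com/mortyc126-debug/SHA-256 | exp66A_join_algebra.py | join_representation
-- ===== SOURCE A (Python) =====
-- def join_representation(x):
--     """Represent x ∈ Z/2^32 as (parity_vector, carry_potential).
--     parity_vector = x (bits as-is)
--     carry_potential[i] = number of consecutive 1-bits ending at position i.
--     """
--     parity = x
--     # Carry potential: length of trailing 1-run at each position
--     potential = [0]*32
--     run = 0
--     for i in range(32):
--         if (x >> i) & 1:
--             run += 1
--         else:
--             run = 0
--         potential[i] = run
--     return parity, potential
-- ===== SOURCE B (Python) =====
-- def join_representation(x):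
--     """Block scan: for each maximal run of consecutive 1-bits starting at i,
--     fill its positions with the increasing prefix counts at once; zeros elsewhere."""
--     potential = [0] * 32
--     i = 0
--     while i < 32:
--         if (x >> i) & 1:
--             j = i
--             while j < 32 and ((x >> j) & 1):
--                 j += 1
--             for k in range(j - i):
--                 potential[i + k] = k + 1
--             i = j
--         else:
--             i += 1
--     return x, potential
-- ===== Notes on version B (the rewrite author's own statement) =====
-- stated objective: alternative
-- what changed: Replaces the per-bit reset-on-zero running counter with a block scan that finds each maximal run of set bits and fills its positions with the increasing prefix counts in one go, advancing the index past the whole run.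
import Mathlib
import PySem

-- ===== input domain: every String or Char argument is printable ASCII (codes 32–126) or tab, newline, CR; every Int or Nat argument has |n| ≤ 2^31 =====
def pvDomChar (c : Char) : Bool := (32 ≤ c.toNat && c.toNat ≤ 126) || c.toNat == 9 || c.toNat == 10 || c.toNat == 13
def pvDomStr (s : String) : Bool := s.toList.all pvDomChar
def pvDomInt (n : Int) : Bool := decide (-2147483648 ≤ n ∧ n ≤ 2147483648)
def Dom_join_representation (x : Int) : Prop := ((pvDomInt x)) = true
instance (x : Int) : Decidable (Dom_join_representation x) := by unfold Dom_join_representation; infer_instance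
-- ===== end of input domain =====

-- B is an alternative decomposition: instead of A's reset-on-zero running counter,
-- it scans maximal runs of set bits and fills each block with increasing prefix counts (same cost).

-- ===== PORT A =====
def join_representation (x : Int) : Int × List Int :=
  let parity := x
  let potential : List Int := List.replicate 32 0
  let st := (PySem.List.pyRange 0 32 1).foldl
    (fun (st : Int × List Int) (i : Int) =>
      let run := if PySem.Int.band (x >>> i.toNat) 1 ≠ 0 then st.1 + 1 else 0
      (run, st.2.set i.toNat run))
    (0, potential)
  (parity, st.2)

-- ===== PORT B =====
-- (x >> i) & 1 as a Bool test
def jrBit (x : Int) (i : Nat) : Bool := PySem.Int.band (x >>> i) 1 != 0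

-- length of the run of 1-bits starting at j (the inner `while j < 32 and bit` loop, L = j - i)
def jrRunLen (x : Int) (j : Nat) : Nat :=
  if h : j < 32 ∧ jrBit x j = true then jrRunLen x (j + 1) + 1 else 0
termination_by 32 - j
decreasing_by omega

theorem jrRunLen_pos (x : Int) (j : Nat) (h1 : j < 32) (h2 : jrBit x j = true) :
    1 ≤ jrRunLen x j := by
  rw [jrRunLen, dif_pos ⟨h1, h2⟩]; omega

-- the outer `while i < 32` loop of B: fill the block, then continue past it
def jrGo (x : Int) (i : Nat) : List Int :=
  if hi : i < 32 then
    if hb : jrBit x i = true then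
      ((List.range (jrRunLen x i)).map (fun (k : Nat) => (k : Int) + 1)) ++ jrGo x (i + jrRunLen x i)
    else
      0 :: jrGo x (i + 1)
  else []
termination_by 32 - i
decreasing_by
  · have := jrRunLen_pos x i hi hb; omega
  · omega

def join_representation_alt (x : Int) : Int × List Int := (x, jrGo x 0)

-- ===== PRECONDITION & SPEC =====
def Spec_join_representation (x : Int) (out : Int × List Int) : Prop := out = join_representation_alt x
instance (x : Int) (out : Int × List Int) : Decidable (Spec_join_representation x out) := by unfold Spec_join_representation; infer_instance

-- ===== CLAIM (what is proved, stated in full; the proofs are below) =====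
def Claim_equal_join_representation : Prop := ∀ (x : Int), Dom_join_representation x → Spec_join_representation x (join_representation x)

-- ===== LEMMAS AND PROOFS =====

-- run value after processing bits 0..n-1 (A's `run` variable)
def jrR (x : Int) : Nat → Int
  | 0 => 0
  | n + 1 => if jrBit x n then jrR x n + 1 else 0

theorem jrA_loop (x : Int) : ∀ n : Nat, n ≤ 32 →
    (PySem.List.pyRange 0 (n : Int) 1).foldl
      (fun (st : Int × List Int) (i : Int) =>
        let run := if PySem.Int.band (x >>> i.toNat) 1 ≠ 0 then st.1 + 1 else 0
        (run, st.2.set i.toNat run))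
      (0, List.replicate 32 0)
    = (jrR x n, (List.range 32).map (fun i => if i < n then jrR x (i + 1) else 0)) := by
  intro n hn
  induction n with
  | zero =>
      simp [jrR]
  | succ n ih =>
      have hc : (((n + 1 : Nat)) : Int) = (n : Int) + 1 := by push_cast; ring
      have h1 : (PySem.List.pyRange 0 ((n : Int) + 1) 1) = PySem.List.pyRange 0 (n : Int) 1 ++ [(n : Int)] :=
        PySem.List.pyRange_one_succ_right (by positivity)
      rw [hc, h1, List.foldl_append, ih (by omega)]
      simp only [List.foldl_cons, List.foldl_nil]
      have hrun : (if PySem.Int.band (x >>> n) 1 ≠ 0 then jrR x n + 1 else 0) = jrR x (n + 1) := by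
        simp only [jrR, jrBit]
        by_cases hb : PySem.Int.band (x >>> n) 1 = 0 <;> simp [hb]
      simp only [Int.toNat_natCast]
      show ((if PySem.Int.band (x >>> n) 1 ≠ 0 then jrR x n + 1 else 0),
          (List.map (fun i => if i < n then jrR x (i + 1) else 0) (List.range 32)).set n
            (if PySem.Int.band (x >>> n) 1 ≠ 0 then jrR x n + 1 else 0)) = _
      rw [hrun]
      refine congrArg (Prod.mk _) ?_
      apply List.ext_getElem
      · simp
      · intro m hm1 hm2
        simp only [List.length_set, List.length_map, List.length_range] at hm1
        simp only [List.getElem_set, List.getElem_map, List.getElem_range]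
        rcases Nat.lt_trichotomy m n with h | h | h
        · simp [Nat.ne_of_gt h, h, Nat.lt_succ_of_lt h]
        · subst h; simp
        · simp [Nat.ne_of_lt h, Nat.lt_asymm h, show ¬ m < n + 1 by omega]

theorem jrRunLen_spec (x : Int) (j : Nat) :
    (∀ k < jrRunLen x j, j + k < 32 ∧ jrBit x (j + k) = true) ∧
    ¬ (j + jrRunLen x j < 32 ∧ jrBit x (j + jrRunLen x j) = true) := by
  fun_induction jrRunLen x j with
  | case1 j h ih =>
      rcases ih with ⟨ih1, ih2⟩
      constructor
      · intro k hk
        cases k with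
        | zero => simpa using h
        | succ k =>
            have hk' := ih1 k (by omega)
            refine ⟨by omega, ?_⟩
            rw [show j + (k + 1) = j + 1 + k by omega]
            exact hk'.2
      · rw [show j + (jrRunLen x (j + 1) + 1) = (j + 1) + jrRunLen x (j + 1) by omega]
        exact ih2
  | case2 j h =>
      exact ⟨fun k hk => by omega, by simpa using h⟩

theorem jrR_run (x : Int) (i m : Nat) (h0 : jrR x i = 0)
    (hb : ∀ k < m, jrBit x (i + k) = true) :
    ∀ k ≤ m, jrR x (i + k) = (k : Int) := by
  intro k hk
  induction k with
  | zero => simpa using h0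
  | succ k ih =>
      have hbk : jrBit x (i + k) = true := hb k (by omega)
      have hstep : jrR x (i + (k + 1)) = jrR x (i + k) + 1 := by
        rw [show i + (k + 1) = (i + k) + 1 by omega]
        simp [jrR, hbk]
      rw [hstep, ih (by omega)]; push_cast; ring

theorem jrMap_shift (g : Nat → Int) (a m : Nat) :
    List.map g (List.map (a + ·) (List.range m)) = List.map (fun k => g (a + k)) (List.range m) := by
  rw [List.map_map]; rfl

theorem jrRange_succ_cons (h : Nat → Int) (m : Nat) :
    List.map h (List.range (m + 1)) = h 0 :: List.map (fun k => h (k + 1)) (List.range m) := by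
  rw [List.range_succ_eq_map, List.map_cons, List.map_map]; rfl

theorem jrGo_eq (x : Int) : ∀ f i : Nat, 32 - i ≤ f → jrR x i = 0 →
    jrGo x i = (List.range (32 - i)).map (fun k => jrR x (i + k + 1)) := by
  intro f
  induction f with
  | zero =>
      intro i hf h0
      rw [jrGo, dif_neg (by omega : ¬ i < 32)]
      simp [show 32 - i = 0 by omega]
  | succ f ih =>
      intro i hf h0
      by_cases hi : i < 32
      · by_cases hb : jrBit x i = true
        · -- block of 1-bits of length L starting at i
          obtain ⟨hs1, hs2⟩ := jrRunLen_spec x i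
          set L := jrRunLen x i with hL
          have hL1 : 1 ≤ L := jrRunLen_pos x i hi hb
          have hiL : i + L ≤ 32 := by
            have := (hs1 (L - 1) (by omega)).1; omega
          have hrun : ∀ k ≤ L, jrR x (i + k) = (k : Int) :=
            jrR_run x i L h0 (fun k hk => (hs1 k hk).2)
          rw [jrGo, dif_pos hi, dif_pos hb, ← hL]
          have hsplit : 32 - i = L + (32 - (i + L)) := by omega
          rw [hsplit, List.range_add, List.map_append]
          refine congrArg₂ (· ++ ·) ?_ ?_
          · -- the filled block equals A's run values there
            apply List.ext_getElem
            · simp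
            · intro m hm1 hm2
              simp only [List.getElem_map, List.getElem_range]
              simp only [List.length_map, List.length_range] at hm1
              rw [show i + m + 1 = i + (m + 1) by omega, hrun (m + 1) (by omega)]
              push_cast; ring
          · -- the rest of the word
            by_cases hend : i + L < 32
            · have hb0 : jrBit x (i + L) = false := by
                by_contra hc
                exact hs2 ⟨hend, by simpa using hc⟩
              have hR0 : jrR x (i + L + 1) = 0 := by
                rw [show i + L + 1 = (i + L) + 1 by omega]; simp [jrR, hb0]
              rw [jrGo, dif_pos hend, dif_neg (by simp [hb0])]
              rw [ih (i + L + 1) (by omega) hR0, jrMap_shift,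
                  show 32 - (i + L) = (32 - (i + L + 1)) + 1 by omega, jrRange_succ_cons]
              refine congrArg₂ List.cons ?_ ?_
              · rw [show i + (L + 0) + 1 = i + L + 1 by omega] at *
                exact hR0.symm ▸ rfl
              · apply List.map_congr_left
                intro k _
                exact (congrArg (jrR x) (by omega)).symm
            · have h32 : i + L = 32 := by omega
              rw [jrGo, dif_neg (by omega)]
              simp [show 32 - (i + L) = 0 by omega]
        · -- 0-bit at i
          have hR0 : jrR x (i + 1) = 0 := by simp [jrR, hb]
          rw [jrGo, dif_pos hi, dif_neg hb, ih (i + 1) (by omega) hR0]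
          rw [show 32 - i = (32 - (i + 1)) + 1 by omega, jrRange_succ_cons]
          refine congrArg₂ List.cons (by simpa using hR0.symm) ?_
          apply List.map_congr_left
          intro k _
          exact (congrArg (jrR x) (by omega)).symm
      · rw [jrGo, dif_neg hi]
        simp [show 32 - i = 0 by omega]

-- ===== VERDICT (by name: the statement is the Claim_ definition above) =====
theorem join_representation_spec : Claim_equal_join_representation := by
  intro x _
  unfold Spec_join_representation
  have hA := jrA_loop x 32 (by omega)
  have hB := jrGo_eq x 32 0 (by omega) (by simp [jrR])
  simp only [Nat.sub_zero] at hB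
  simp only [Nat.cast_ofNat] at hA
  simp only [join_representation, join_representation_alt, hA, hB]
  refine congrArg (Prod.mk _) ?_
  apply List.map_congr_left
  intro k hk
  simp only [List.mem_range] at hk
  simp [hk]
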